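-- pv_equiv track=rewrite | github.com/Enjef/Algo | 1100 - 1199/1160 - Find Words That Can Be Formed by Characters/1160 - Find Words That Can Be Formed by Characters.py | countCharacters_mock
-- ===== SOURCE A (Python) =====
-- from typing import List
--
-- def countCharacters_mock(
--
--         words: List[str],
--         chars: str) -> int:  # 78.76% 26.73%
--     out = 0
--     chars_count = {}
--     for char in chars:
--         chars_count[char] = chars_count.get(char, 0) + 1
--     for word in words:
--         for char in set(word):
--             if (
--                     char not in chars_count or
--                     word.count(char) > chars_count.get(char)):
--                 break
--         else:
--             out += len(word)
--     return out
-- ===== SOURCE B (Python) =====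
-- def countCharacters_mock(words, chars):
--     # Sort the pool once; a word is formable iff sorted(word) is a subsequence
--     # of sorted(chars), checked by a greedy merge scan (no frequency tables).
--     pool = sorted(chars)
--     total = 0
--     for word in words:
--         w = sorted(word)
--         i = 0
--         for c in pool:
--             if i < len(w) and w[i] == c:
--                 i += 1
--         if i == len(w):
--             total += len(word)
--     return total
-- ===== Notes on version B (the rewrite author's own statement) =====
-- stated objective: alternative
-- what changed: Replaces A's per-word frequency scan (dict of chars counts plus word.count per distinct letter with break/else) by sorting the pool once and each word, then testing formability as a greedy two-pointer subsequence check of sorted(word) within sorted(chars), with no counting at all.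
import Mathlib
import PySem

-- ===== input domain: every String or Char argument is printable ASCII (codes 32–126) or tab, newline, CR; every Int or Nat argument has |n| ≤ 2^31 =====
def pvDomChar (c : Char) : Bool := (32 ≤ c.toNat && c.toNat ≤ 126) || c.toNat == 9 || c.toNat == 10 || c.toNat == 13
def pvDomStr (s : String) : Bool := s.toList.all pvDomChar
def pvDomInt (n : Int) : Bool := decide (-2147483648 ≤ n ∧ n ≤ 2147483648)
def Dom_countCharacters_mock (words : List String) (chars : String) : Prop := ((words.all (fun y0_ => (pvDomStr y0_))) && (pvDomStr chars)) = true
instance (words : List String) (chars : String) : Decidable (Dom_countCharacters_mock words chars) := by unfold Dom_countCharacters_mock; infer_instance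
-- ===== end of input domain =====

-- B replaces A's per-word frequency scan (chars-count dict + word.count with break/else)
-- by sorting the pool and each word and running a greedy two-pointer subsequence check
-- of sorted(word) within sorted(chars) — no counting tables at all (alternative algorithm).


-- ===== PORT A =====
-- the inner 'for char in set(word): if …: break / else: out += len(word)' loop:
-- returns true iff the loop finishes without break (order over the set is irrelevant:
-- the result only says whether SOME element triggers the break).
-- 'word.count(char)' for a single character is ported as List.count on the code points
-- (exact: a length-1 substring count is the character count).
def pvScanA (s : List Char) (w : List Char) (d : PySem.Dict Char Int) : Bool :=
  match s with
  | [] => true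
  | c :: rest =>
    if ¬ (d.contains c) ∨ (w.count c : Int) > d.getD c 0 then false
    else pvScanA rest w d

def countCharacters_mock (words : List String) (chars : String) : Int :=
  let charsCount : PySem.Dict Char Int :=
    chars.toList.foldl (fun d c => d.insert c (d.getD c 0 + 1)) PySem.Dict.empty
  words.foldl (fun out word =>
    if pvScanA (PySem.Set.ofList word.toList) word.toList charsCount then
      out + (word.toList.length : Int)
    else out) 0

-- ===== PORT B =====
def countCharacters_mock_alt (words : List String) (chars : String) : Int :=
  let pool := PySem.List.sorted chars.toList (fun c => c) false
  words.foldl (fun total word =>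
    let w := PySem.List.sorted word.toList (fun c => c) false
    let i : Int := pool.foldl (fun i c =>
      if i < (w.length : Int) ∧ PySem.List.pyGet? w i = some c then i + 1 else i) 0
    if i = (w.length : Int) then total + (word.toList.length : Int) else total) 0

-- ===== PRECONDITION & SPEC =====
def Spec_countCharacters_mock (words : List String) (chars : String) (out : Int) : Prop := out = countCharacters_mock_alt words chars
instance (words : List String) (chars : String) (out : Int) : Decidable (Spec_countCharacters_mock words chars out) := by unfold Spec_countCharacters_mock; infer_instance

-- ===== CLAIM (what is proved, stated in full; the proofs are below) =====
def Claim_equal_countCharacters_mock : Prop := ∀ (words : List String) (chars : String), Dom_countCharacters_mock words chars → Spec_countCharacters_mock words chars (countCharacters_mock words chars)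

-- ===== LEMMAS AND PROOFS =====

-- A's break/else scan is the 'all' of its per-element test
theorem pvScanA_eq_all (s w : List Char) (d : PySem.Dict Char Int) :
    pvScanA s w d = s.all (fun c => !(decide (¬ (d.contains c) ∨ (w.count c : Int) > d.getD c 0))) := by
  induction s with
  | nil => rfl
  | cons c rest ih =>
    simp only [pvScanA, List.all_cons, ih]
    by_cases h : ¬ (d.contains c) ∨ (w.count c : Int) > d.getD c 0
    · rw [if_pos h, decide_eq_true h, Bool.not_true, Bool.false_and]
    · rw [if_neg h, decide_eq_false h, Bool.not_false, Bool.true_and]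

-- A's per-word scan decides the sub-multiset (subpermutation) relation
theorem pvScanA_iff_subperm (w cl : List Char) :
    pvScanA (PySem.Set.ofList w) w (PySem.Dict.counter cl) = true ↔ List.Subperm w cl := by
  rw [pvScanA_eq_all, List.subperm_ext_iff, List.all_eq_true]
  constructor <;> intro H c hc
  · have h := H c ((PySem.Set.mem_ofList w c).2 hc)
    simp only [PySem.Dict.getD_counter, Bool.not_eq_eq_eq_not, Bool.not_true,
      decide_eq_false_iff_not, not_or, not_lt, gt_iff_lt] at h
    exact_mod_cast h.2
  · have hcw := (PySem.Set.mem_ofList w c).1 hc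
    have h := H c hcw
    have hmem : c ∈ cl := by
      have : 0 < w.count c := List.count_pos_iff.mpr hcw
      have : 0 < cl.count c := lt_of_lt_of_le this h
      exact List.count_pos_iff.mp this
    simp only [PySem.Dict.getD_counter, PySem.Dict.contains_counter, Bool.not_eq_eq_eq_not,
      Bool.not_true, decide_eq_false_iff_not, not_or, not_lt, gt_iff_lt]
    refine ⟨by simp [hmem], by exact_mod_cast h⟩

-- the greedy merge as a structural recursion (proof-side model of B's inner loop)
def pvG : List Char → List Char → Nat
  | _, [] => 0
  | [], _ :: _ => 0
  | a :: w, c :: p => if a = c then pvG w p + 1 else pvG (a :: w) p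

theorem pvG_nil (p : List Char) : pvG [] p = 0 := by cases p <;> rfl

-- greedy subsequence matching is complete: it matches all of w iff w is a sublist of p
theorem pvG_eq_length_iff (w p : List Char) : pvG w p = w.length ↔ List.Sublist w p := by
  induction p generalizing w with
  | nil =>
    cases w with
    | nil => simp [pvG]
    | cons a w' => simp [pvG]
  | cons c p' ih =>
    cases w with
    | nil => simp [pvG_nil]
    | cons a w' =>
      by_cases hac : a = c
      · subst hac
        simp only [pvG, if_true, List.length_cons,
          Nat.add_right_cancel_iff, List.cons_sublist_cons]
        exact ih w'
      · simp only [pvG, if_neg hac]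
        rw [ih (a :: w')]
        constructor
        · exact fun h => h.cons c
        · intro h
          cases h with
          | cons _ h => exact h
          | cons₂ => exact absurd rfl hac

-- B's foldl over the pool computes the greedy match count
theorem pvFoldl_eq_pvG (w : List Char) (p : List Char) (k : Nat) :
    p.foldl (fun i c =>
      if i < (w.length : Int) ∧ PySem.List.pyGet? w i = some c then i + 1 else i) (k : Int)
    = ((k + pvG (w.drop k) p : Nat) : Int) := by
  induction p generalizing k with
  | nil => simp [pvG]
  | cons c p' ih =>
    simp only [List.foldl_cons]
    by_cases hk : k < w.length
    · have hdrop : w.drop k = w[k] :: w.drop (k + 1) := (List.getElem_cons_drop hk).symm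
      have hget : PySem.List.pyGet? w (k : Int) = some w[k] := by
        rw [PySem.List.pyGet?_natCast]; simp [hk]
      by_cases hc : w[k] = c
      · rw [if_pos ⟨by exact_mod_cast hk, by rw [hget, hc]⟩]
        have : ((k : Int) + 1) = ((k + 1 : Nat) : Int) := by push_cast; ring
        rw [this, ih (k + 1), hdrop]
        simp only [pvG, if_pos hc]
        push_cast; ring
      · rw [if_neg (by rintro ⟨-, h⟩; rw [hget] at h; exact hc (Option.some.inj h))]
        rw [ih k, hdrop]
        simp only [pvG, if_neg hc, hdrop.symm]
    · have hdrop : w.drop k = [] := List.drop_eq_nil_of_le (by omega)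
      rw [if_neg (by rintro ⟨h, -⟩; exact hk (by exact_mod_cast h))]
      rw [ih k, hdrop]
      simp [pvG_nil]

-- sorted(word) is a sublist of sorted(chars) iff word is a sub-multiset of chars
theorem pvSorted_sublist_iff (w cl : List Char) :
    List.Sublist (PySem.List.sorted w (fun c => c) false) (PySem.List.sorted cl (fun c => c) false)
      ↔ List.Subperm w cl := by
  constructor
  · intro h
    rw [← (PySem.List.sorted_perm w (fun c => c) false).subperm_right,
        ← (PySem.List.sorted_perm cl (fun c => c) false).subperm_left]
    exact h.subperm
  · intro h
    apply List.sublist_of_subperm_of_sortedLE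
    · rw [(PySem.List.sorted_perm w (fun c => c) false).subperm_right,
          (PySem.List.sorted_perm cl (fun c => c) false).subperm_left]
      exact h
    · exact (PySem.List.sorted_pairwise w (fun c => c)).sortedLE
    · exact (PySem.List.sorted_pairwise cl (fun c => c)).sortedLE

-- ===== VERDICT (by name: the statement is the Claim_ definition above) =====
theorem countCharacters_mock_spec : Claim_equal_countCharacters_mock := by
  intro words chars _
  unfold Spec_countCharacters_mock countCharacters_mock countCharacters_mock_alt
  rw [PySem.Dict.foldl_insert_getD_add_one_eq_counter]
  apply PySem.List.foldl_congr_mem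
  intro acc word _
  have hb := pvFoldl_eq_pvG (PySem.List.sorted word.toList (fun c => c) false)
      (PySem.List.sorted chars.toList (fun c => c) false) 0
  simp only [List.drop_zero, Nat.cast_zero, zero_add] at hb
  simp only [hb]
  by_cases h : List.Subperm word.toList chars.toList
  · rw [if_pos ((pvScanA_iff_subperm _ _).2 h),
        if_pos (by exact_mod_cast (pvG_eq_length_iff _ _).2 ((pvSorted_sublist_iff _ _).2 h))]
  · rw [if_neg (fun hc => h ((pvScanA_iff_subperm _ _).1 hc)),
        if_neg (fun hc => h ((pvSorted_sublist_iff _ _).1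
          ((pvG_eq_length_iff _ _).1 (by exact_mod_cast hc))))]
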